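-- pv_equiv track=rewrite | github.com/developper89/data-pipeline | storage/parser_scripts/coap_parser.old.py | _determine_sensor_type_from_channels
-- ===== SOURCE A (Python) =====
-- from typing import List, Dict, Any, Optional
--
-- def _get_sensor_type_from_measurement_type(measurement_type) -> str:
--     """
--     Determine sensor type (continuous/binary) from measurement type string or enum value.
--
--     Args:
--         measurement_type: Measurement type string (e.g., "MEASUREMENT_TYPE_TEMPERATURE") or enum value
--
--     Returns:
--         str: Sensor type ("continuous" or "binary")
--     """
--     # Binary sensor types (from proto_measurement_types.proto comments)
--     # Map both string names and enum values
--     binary_types = {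
--         # String names
--         "MEASUREMENT_TYPE_OK_ALARM",
--         "MEASUREMENT_TYPE_FLOODING",
--         "MEASUREMENT_TYPE_OUTPUT_CONTROL",
--         # Enum values (from proto_measurement_types.proto)
--         5,  # MEASUREMENT_TYPE_OK_ALARM
--         7,  # MEASUREMENT_TYPE_FLOODING
--         42, # MEASUREMENT_TYPE_OUTPUT_CONTROL
--     }
--
--     if measurement_type in binary_types:
--         return "binary"
--     else:
--         return "continuous"
--
-- def _determine_overall_sensor_type(measurement_types: List) -> str:
--     """
--     Determine overall sensor type from a list of measurement types.
--
--     Args: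
--         measurement_types: List of measurement types (strings or enum values)
--
--     Returns:
--         str: "continuous", "binary", or "mixed"
--     """
--     has_binary = False
--     has_continuous = False
--
--     for measurement_type in measurement_types:
--         if measurement_type:  # Skip empty/None values
--             sensor_type = _get_sensor_type_from_measurement_type(measurement_type)
--             if sensor_type == "binary":
--                 has_binary = True
--             else:
--                 has_continuous = True
--
--     if has_binary and has_continuous:
--         return "mixed"
--     elif has_binary:
--         return "binary"
--     else:
--         return "continuous"
--
-- def _determine_sensor_type_from_channels(channels: List[Dict[str, Any]]) -> str:
--     """
--     Determine overall sensor type from channels data.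
--
--     Args:
--         channels: List of channel dictionaries from measurements
--
--     Returns:
--         str: "continuous", "binary", or "mixed"
--     """
--     measurement_types = []
--
--     for channel in channels:
--         if isinstance(channel, dict):
--             measure_type = channel.get("type", "")
--             if measure_type:
--                 measurement_types.append(measure_type)
--
--     return _determine_overall_sensor_type(measurement_types)
-- ===== SOURCE B (Python) =====
-- def _determine_sensor_type_from_channels(channels):
--     binary_types = {
--         "MEASUREMENT_TYPE_OK_ALARM",
--         "MEASUREMENT_TYPE_FLOODING",
--         "MEASUREMENT_TYPE_OUTPUT_CONTROL",
--         5,  # MEASUREMENT_TYPE_OK_ALARM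
--         7,  # MEASUREMENT_TYPE_FLOODING
--         42, # MEASUREMENT_TYPE_OUTPUT_CONTROL
--     }
--
--     def channel_type(c):
--         """The channel's type if it counts, else None."""
--         if isinstance(c, dict):
--             t = c.get("type", "")
--             if t:
--                 return t
--         return None
--
--     # Phase 1: find the class of the first typed channel.
--     it = iter(channels)
--     first_is_binary = None
--     for c in it:
--         t = channel_type(c)
--         if t is not None:
--             first_is_binary = t in binary_types
--             break
--     if first_is_binary is None:
--         return "continuous"
--
--     # Phase 2: scan the remainder only for the OPPOSITE class; early exit.
--     for c in it:
--         t = channel_type(c)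
--         if t is not None and (t in binary_types) != first_is_binary:
--             return "mixed"
--     return "binary" if first_is_binary else "continuous"
-- ===== Notes on version B (the rewrite author's own statement) =====
-- stated objective: alternative
-- what changed: Replaces A's collect-then-classify pass with two boolean flags by a two-phase short-circuit search: find the class of the first typed channel, then scan the remainder only for the opposite class and return 'mixed' at the first opposite hit.
import Mathlib
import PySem

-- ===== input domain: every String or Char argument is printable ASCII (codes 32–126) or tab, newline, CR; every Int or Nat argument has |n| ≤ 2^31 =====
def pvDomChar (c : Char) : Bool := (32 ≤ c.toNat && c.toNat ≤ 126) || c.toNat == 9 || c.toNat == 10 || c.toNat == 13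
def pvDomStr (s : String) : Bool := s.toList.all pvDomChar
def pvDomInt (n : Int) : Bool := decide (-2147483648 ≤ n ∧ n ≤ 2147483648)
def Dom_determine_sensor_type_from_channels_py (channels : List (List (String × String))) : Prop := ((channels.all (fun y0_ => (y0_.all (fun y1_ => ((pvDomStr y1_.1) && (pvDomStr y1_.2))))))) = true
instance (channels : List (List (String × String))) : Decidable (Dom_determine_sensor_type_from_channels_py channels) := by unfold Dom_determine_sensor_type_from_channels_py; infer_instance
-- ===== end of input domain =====

-- B replaces A's collect-then-classify pass with two boolean flags by a two-phase
-- short-circuit search: classify the first typed channel, then scan the remainder only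
-- for the opposite class, returning "mixed" at the first hit (objective: alternative).


-- The Python binary_types set also holds the ints 5, 7 and 42; a str value can never
-- equal an int, so for string-valued dicts only the three names matter.
def pvBinaryTypeNames : List String :=
  ["MEASUREMENT_TYPE_OK_ALARM", "MEASUREMENT_TYPE_FLOODING", "MEASUREMENT_TYPE_OUTPUT_CONTROL"]

-- channel.get("type", "")
def pvGetType (c : List (String × String)) : String := (PySem.Dict.mk c).getD "type" ""

-- ===== PORT A =====
def pvGetSensorTypeFromMeasurementType (measurement_type : String) : String :=
  if pvBinaryTypeNames.contains measurement_type then "binary" else "continuous"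

def pvDetermineOverallSensorType (measurement_types : List String) : String :=
  let st := measurement_types.foldl (fun (p : Bool × Bool) t =>
    if t ≠ "" then
      if pvGetSensorTypeFromMeasurementType t = "binary" then (true, p.2) else (p.1, true)
    else p) (false, false)
  if st.1 && st.2 then "mixed"
  else if st.1 then "binary"
  else "continuous"

def determine_sensor_type_from_channels_py (channels : List (List (String × String))) : String :=
  let measurement_types := channels.foldl (fun acc c =>
    let t := pvGetType c
    if t ≠ "" then acc ++ [t] else acc) []
  pvDetermineOverallSensorType measurement_types

-- ===== PORT B =====
-- Source B's channel_type: the channel's type if truthy, else None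
def pvChannelType (c : List (String × String)) : Option String :=
  let t := pvGetType c
  if t ≠ "" then some t else none

-- Source B's phase 1: first typed channel's class and the remaining iterator
def pvFindFirstClass : List (List (String × String)) → Option (Bool × List (List (String × String)))
  | [] => none
  | c :: rest =>
    match pvChannelType c with
    | some t => some (pvBinaryTypeNames.contains t, rest)
    | none => pvFindFirstClass rest

-- Source B's phase 2: does the remainder contain a typed channel of the opposite class?
def pvScanOpposite (firstIsBinary : Bool) : List (List (String × String)) → Bool
  | [] => false
  | c :: rest =>
    match pvChannelType c with
    | some t =>
      if pvBinaryTypeNames.contains t ≠ firstIsBinary then true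
      else pvScanOpposite firstIsBinary rest
    | none => pvScanOpposite firstIsBinary rest

def determine_sensor_type_from_channels_py_alt (channels : List (List (String × String))) : String :=
  match pvFindFirstClass channels with
  | none => "continuous"
  | some (firstIsBinary, rest) =>
    if pvScanOpposite firstIsBinary rest then "mixed"
    else if firstIsBinary then "binary" else "continuous"

-- ===== PRECONDITION & SPEC =====
def Spec_determine_sensor_type_from_channels_py (channels : List (List (String × String))) (out : String) : Prop := out = determine_sensor_type_from_channels_py_alt channels
instance (channels : List (List (String × String))) (out : String) : Decidable (Spec_determine_sensor_type_from_channels_py channels out) := by unfold Spec_determine_sensor_type_from_channels_py; infer_instance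

-- ===== CLAIM (what is proved, stated in full; the proofs are below) =====
def Claim_equal_determine_sensor_type_from_channels_py : Prop := ∀ (channels : List (List (String × String))), Dom_determine_sensor_type_from_channels_py channels → Spec_determine_sensor_type_from_channels_py channels (determine_sensor_type_from_channels_py channels)

-- ===== LEMMAS AND PROOFS =====

-- whether a channel contributes, and whether it contributes "binary"
def pvGuard (c : List (String × String)) : Bool := pvGetType c ≠ ""
def pvIsBin (c : List (String × String)) : Bool := pvBinaryTypeNames.contains (pvGetType c)

-- A's boolean fold, characterised
lemma a_bool_fold (l : List String) (p : Bool × Bool) :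
    l.foldl (fun (p : Bool × Bool) t =>
      if t ≠ "" then
        if pvGetSensorTypeFromMeasurementType t = "binary" then (true, p.2) else (p.1, true)
      else p) p
    = (p.1 || l.any (fun t => decide (t ≠ "") && pvBinaryTypeNames.contains t),
       p.2 || l.any (fun t => decide (t ≠ "") && !pvBinaryTypeNames.contains t)) := by
  induction l generalizing p with
  | nil => simp
  | cons t l ih =>
    rw [List.foldl_cons, ih]
    by_cases ht : t = "" <;> by_cases hb : t ∈ pvBinaryTypeNames <;>
      simp [pvGetSensorTypeFromMeasurementType, ht, hb]

-- A's list-building fold is filter∘map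
lemma a_list_fold (channels : List (List (String × String))) (acc : List String) :
    channels.foldl (fun acc c =>
      let t := pvGetType c
      if t ≠ "" then acc ++ [t] else acc) acc
    = acc ++ (channels.filter pvGuard).map pvGetType := by
  induction channels generalizing acc with
  | nil => simp
  | cons c l ih =>
    rw [List.foldl_cons, ih]
    by_cases h : pvGetType c = "" <;> simp [pvGuard, h]

lemma any_filter_map (channels : List (List (String × String))) (g : String → Bool) :
    ((channels.filter pvGuard).map pvGetType).any g
    = channels.any (fun c => pvGuard c && g (pvGetType c)) := by
  induction channels with
  | nil => rfl
  | cons c l ih =>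
    by_cases h : pvGuard c = true <;> simp [h, ih]

-- abbreviations for A's two flags
def pvAnyBin (l : List (List (String × String))) : Bool := l.any (fun c => pvGuard c && pvIsBin c)
def pvAnyCont (l : List (List (String × String))) : Bool := l.any (fun c => pvGuard c && !pvIsBin c)

-- B's phase-2 scan finds exactly the opposite class
lemma scanOpposite_char (b : Bool) (l : List (List (String × String))) :
    pvScanOpposite b l = l.any (fun c => pvGuard c && (pvIsBin c != b)) := by
  induction l with
  | nil => rfl
  | cons c l ih =>
    by_cases hg : pvGetType c = ""
    · simp [pvScanOpposite, pvChannelType, pvGuard, hg, ih]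
    · cases hb : pvBinaryTypeNames.contains (pvGetType c) <;>
        simp only [List.contains_eq_mem, decide_eq_true_eq, decide_eq_false_iff_not] at hb <;> cases b <;>
        simp [pvScanOpposite, pvChannelType, pvGuard, pvIsBin, hg, hb, ih]

-- B computed from A's two flags
lemma b_char (l : List (List (String × String))) :
    determine_sensor_type_from_channels_py_alt l
    = (if pvAnyBin l && pvAnyCont l then "mixed"
       else if pvAnyBin l then "binary" else "continuous") := by
  induction l with
  | nil => rfl
  | cons c l ih =>
    by_cases hg : pvGetType c = ""
    · have h1 : pvFindFirstClass (c :: l) = pvFindFirstClass l := by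
        simp [pvFindFirstClass, pvChannelType, hg]
      have h2 : pvGuard c = false := by simp [pvGuard, hg]
      simp only [determine_sensor_type_from_channels_py_alt, h1, pvAnyBin, pvAnyCont,
        List.any_cons, h2, Bool.false_and, Bool.false_or] at *
      exact ih
    · cases hb : pvBinaryTypeNames.contains (pvGetType c) <;>
        simp only [List.contains_eq_mem, decide_eq_true_eq, decide_eq_false_iff_not] at hb
      · -- first typed channel is continuous
        have halt : determine_sensor_type_from_channels_py_alt (c :: l)
            = if pvScanOpposite false l = true then "mixed" else "continuous" := by
          simp [determine_sensor_type_from_channels_py_alt, pvFindFirstClass, pvChannelType, hg, hb]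
        have hsc : pvScanOpposite false l = pvAnyBin l := by
          rw [scanOpposite_char]; unfold pvAnyBin
          apply congrArg; funext x; cases pvIsBin x <;> simp
        have hB : pvAnyBin (c :: l) = pvAnyBin l := by
          simp [pvAnyBin, pvGuard, pvIsBin, hg, hb]
        have hC : pvAnyCont (c :: l) = true := by
          simp [pvAnyCont, pvGuard, pvIsBin, hg, hb]
        rw [halt, hsc, hB, hC]
        cases pvAnyBin l <;> simp
      · -- first typed channel is binary
        have halt : determine_sensor_type_from_channels_py_alt (c :: l)
            = if pvScanOpposite true l = true then "mixed" else "binary" := by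
          simp [determine_sensor_type_from_channels_py_alt, pvFindFirstClass, pvChannelType, hg, hb]
        have hsc : pvScanOpposite true l = pvAnyCont l := by
          rw [scanOpposite_char]; unfold pvAnyCont
          apply congrArg; funext x; cases pvIsBin x <;> simp
        have hB : pvAnyBin (c :: l) = true := by
          simp [pvAnyBin, pvGuard, pvIsBin, hg, hb]
        have hC : pvAnyCont (c :: l) = pvAnyCont l := by
          simp [pvAnyCont, pvGuard, pvIsBin, hg, hb]
        rw [halt, hsc, hB, hC]
        cases pvAnyCont l <;> simp

-- ===== VERDICT (by name: the statement is the Claim_ definition above) =====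
theorem determine_sensor_type_from_channels_py_spec : Claim_equal_determine_sensor_type_from_channels_py := by
  intro channels _
  unfold Spec_determine_sensor_type_from_channels_py
  rw [b_char]
  unfold determine_sensor_type_from_channels_py
  simp only [a_list_fold, List.nil_append, pvDetermineOverallSensorType, a_bool_fold,
    Bool.false_or, any_filter_map]
  have eA : channels.any (fun c => pvGuard c && (decide (pvGetType c ≠ "") && pvBinaryTypeNames.contains (pvGetType c)))
      = pvAnyBin channels := by
    apply congrArg (List.any channels); funext c
    simp only [pvGuard, pvIsBin]
    by_cases h : pvGetType c = "" <;> simp [h]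
  have eC : channels.any (fun c => pvGuard c && (decide (pvGetType c ≠ "") && !pvBinaryTypeNames.contains (pvGetType c)))
      = pvAnyCont channels := by
    apply congrArg (List.any channels); funext c
    simp only [pvGuard, pvIsBin]
    by_cases h : pvGetType c = "" <;> simp [h]
  rw [eA, eC]
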